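-- pv_equiv track=rewrite | github.com/jlunder00/TMN_DataGen | tests/test_parallelization.py | get_sample_text_pairs
-- ===== SOURCE A (Python) =====
-- from typing import List, Tuple, Dict, Any, Optional
--
-- def get_sample_text_pairs(size: int = 10) -> Tuple[List[Tuple[str, str]], List[str]]:
--     """Get sample text pairs and labels for testing"""
--     base_pairs = [
--         ("The cat sits on the mat.", "A feline rests on a rug."),
--         ("Dogs love to play fetch.", "Canines enjoy playing with balls."),
--         ("Birds can fly high.", "Avians soar through air."),
--         ("Fish swim in ocean.", "Marine life inhabits water."),
--         ("Sun shines brightly.", "Light illuminates the day."),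
--         ("Children read books.", "Kids enjoy stories."),
--         ("Music brings joy.", "Songs make people happy."),
--         ("Flowers bloom in spring.", "Plants grow in springtime."),
--         ("Cars drive on roads.", "Vehicles travel on highways."),
--         ("Students learn in school.", "Pupils study in classrooms."),
--     ]
--
--     labels = ["entailment", "neutral", "contradiction"]
--
--     # Generate requested size by cycling through base data
--     text_pairs = []
--     test_labels = []
--
--     for i in range(size):
--         pair_idx = i % len(base_pairs)
--         label_idx = i % len(labels)
--         text_pairs.append(base_pairs[pair_idx])
--         test_labels.append(labels[label_idx])
--
--     return text_pairs, test_labels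
-- ===== SOURCE B (Python) =====
-- def get_sample_text_pairs(size: int = 10):
--     """Get sample text pairs and labels for testing"""
--     base_pairs = [
--         ("The cat sits on the mat.", "A feline rests on a rug."),
--         ("Dogs love to play fetch.", "Canines enjoy playing with balls."),
--         ("Birds can fly high.", "Avians soar through air."),
--         ("Fish swim in ocean.", "Marine life inhabits water."),
--         ("Sun shines brightly.", "Light illuminates the day."),
--         ("Children read books.", "Kids enjoy stories."),
--         ("Music brings joy.", "Songs make people happy."),
--         ("Flowers bloom in spring.", "Plants grow in springtime."),
--         ("Cars drive on roads.", "Vehicles travel on highways."),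
--         ("Students learn in school.", "Pupils study in classrooms."),
--     ]
--     labels = ["entailment", "neutral", "contradiction"]
--     n = max(size, 0)
--     text_pairs = (base_pairs * (n // len(base_pairs) + 1))[:n]
--     test_labels = (labels * (n // len(labels) + 1))[:n]
--     return text_pairs, test_labels
-- ===== Notes on version B (the rewrite author's own statement) =====
-- stated objective: alternative
-- what changed: Replaces the per-index loop that appends base_pairs[i % 10] and labels[i % 3] with a repeat-then-truncate construction: clamp size to n = max(size, 0), build each list once by list-multiplication and slice it to length n.
import Mathlib
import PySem

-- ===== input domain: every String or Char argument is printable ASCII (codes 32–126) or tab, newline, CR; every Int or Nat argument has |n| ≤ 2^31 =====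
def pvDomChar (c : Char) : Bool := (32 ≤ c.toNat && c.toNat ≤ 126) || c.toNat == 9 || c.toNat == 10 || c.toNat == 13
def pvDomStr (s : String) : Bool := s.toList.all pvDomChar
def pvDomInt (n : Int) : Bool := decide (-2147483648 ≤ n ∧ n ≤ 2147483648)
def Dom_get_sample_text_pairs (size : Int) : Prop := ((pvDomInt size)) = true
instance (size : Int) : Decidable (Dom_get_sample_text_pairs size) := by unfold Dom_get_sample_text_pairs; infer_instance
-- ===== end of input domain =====

-- B replaces A's per-index modulo-and-append loop by repeat-then-truncate (list multiply + slice); objective: alternative decomposition, same cost.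

def pvBasePairs : List (String × String) := [
  ("The cat sits on the mat.", "A feline rests on a rug."),
  ("Dogs love to play fetch.", "Canines enjoy playing with balls."),
  ("Birds can fly high.", "Avians soar through air."),
  ("Fish swim in ocean.", "Marine life inhabits water."),
  ("Sun shines brightly.", "Light illuminates the day."),
  ("Children read books.", "Kids enjoy stories."),
  ("Music brings joy.", "Songs make people happy."),
  ("Flowers bloom in spring.", "Plants grow in springtime."),
  ("Cars drive on roads.", "Vehicles travel on highways."),
  ("Students learn in school.", "Pupils study in classrooms.")]

def pvLabels : List String := ["entailment", "neutral", "contradiction"]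

-- ===== PORT A =====
-- the loop body: base_pairs[i % 10] / labels[i % 3]; the indices are always in range, so pyGetD is exact
def get_sample_text_pairs (size : Int) : (List (String × String)) × List String :=
  (PySem.List.pyRange 0 size 1).foldl
    (fun (acc : List (String × String) × List String) i =>
      (acc.1 ++ [PySem.List.pyGetD pvBasePairs (PySem.Int.mod i (pvBasePairs.length : Int)) ("", "")],
       acc.2 ++ [PySem.List.pyGetD pvLabels (PySem.Int.mod i (pvLabels.length : Int)) ""]))
    ([], [])

-- ===== PORT B =====
-- 'base_pairs * k' is ported as (List.replicate k base_pairs).flatten; '[:n]' as PySem.List.slice … none (some n)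
def get_sample_text_pairs_alt (size : Int) : (List (String × String)) × List String :=
  let n : Int := max size 0
  (PySem.List.slice ((List.replicate (PySem.Int.floordiv n (pvBasePairs.length : Int) + 1).toNat pvBasePairs).flatten) none (some n),
   PySem.List.slice ((List.replicate (PySem.Int.floordiv n (pvLabels.length : Int) + 1).toNat pvLabels).flatten) none (some n))

-- ===== PRECONDITION & SPEC =====
def Spec_get_sample_text_pairs (size : Int) (out : (List (String × String)) × List String) : Prop := out = get_sample_text_pairs_alt size
instance (size : Int) (out : (List (String × String)) × List String) : Decidable (Spec_get_sample_text_pairs size out) := by unfold Spec_get_sample_text_pairs; infer_instance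

-- ===== CLAIM (what is proved, stated in full; the proofs are below) =====
def Claim_equal_get_sample_text_pairs : Prop := ∀ (size : Int), Dom_get_sample_text_pairs size → Spec_get_sample_text_pairs size (get_sample_text_pairs size)

-- ===== LEMMAS AND PROOFS =====

-- a pair-state foldl of two independent appends splits into two maps
theorem pv_foldl_pair_append {α β γ : Type} (l : List α) (f : α → β) (g : α → γ)
    (acc : List β × List γ) :
    l.foldl (fun acc i => (acc.1 ++ [f i], acc.2 ++ [g i])) acc = (acc.1 ++ l.map f, acc.2 ++ l.map g) := by
  induction l generalizing acc with
  | nil => simp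
  | cons x xs ih => simp [ih]

-- take n of a list is the range-n table of its getD values
theorem pv_take_eq_map_range {α : Type} (l : List α) (d : α) (n : Nat) (hn : n ≤ l.length) :
    l.take n = (List.range n).map (fun i => l.getD i d) := by
  apply List.ext_getElem
  · simp [hn]
  · intro i h1 h2
    simp at h1 h2
    simp [List.getElem_take, List.getD_eq_getElem?_getD, List.getElem?_eq_getElem (by omega : i < l.length)]

-- truncating k copies of l is the cyclic table of l
theorem pv_flatten_replicate_take {α : Type} (l : List α) (d : α) (k n : Nat)
    (_hl : 0 < l.length) (hn : n ≤ k * l.length) :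
    ((List.replicate k l).flatten).take n = (List.range n).map (fun i => l.getD (i % l.length) d) := by
  induction k generalizing n with
  | zero =>
    have : n = 0 := by omega
    simp [this]
  | succ k ih =>
    rw [List.replicate_succ, List.flatten_cons]
    by_cases h : n ≤ l.length
    · rw [List.take_append_of_le_length h, pv_take_eq_map_range l d n h]
      apply List.map_congr_left
      intro i hi
      simp at hi
      rw [Nat.mod_eq_of_lt (by omega)]
    · replace h : l.length < n := by omega
      rw [List.take_append, List.take_of_length_le (by omega), ih (n - l.length) (by simp [Nat.succ_mul] at hn; omega)]
      have hsplit : n = l.length + (n - l.length) := by omega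
      rw [hsplit, List.range_add, List.map_append, List.map_map]
      congr 1
      · have hm : (List.range l.length).map (fun i => l.getD (i % l.length) d)
              = (List.range l.length).map (fun i => l.getD i d) :=
          List.map_congr_left (fun i hi => by simp at hi; rw [Nat.mod_eq_of_lt hi])
        rw [hm, ← pv_take_eq_map_range l d l.length le_rfl, List.take_length]
      · have he : l.length + (n - l.length) - l.length = n - l.length := by omega
        rw [he]
        apply List.map_congr_left
        intro i _
        simp [Function.comp, Nat.add_mod_left]

-- A's result as a cyclic table
theorem pv_A_eq (size : Int) :
    get_sample_text_pairs size =
      ((List.range size.toNat).map (fun i => pvBasePairs.getD (i % pvBasePairs.length) ("", "")),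
       (List.range size.toNat).map (fun i => pvLabels.getD (i % pvLabels.length) "")) := by
  unfold get_sample_text_pairs
  rw [PySem.List.pyRange_one, pv_foldl_pair_append]
  simp only [List.nil_append, Int.sub_zero, List.map_map]
  congr 1 <;>
  · apply List.map_congr_left
    intro i _
    simp only [Function.comp, zero_add, PySem.Int.mod_natCast, PySem.List.pyGetD_natCast]

theorem pv_main : ∀ (size : Int), get_sample_text_pairs size = get_sample_text_pairs_alt size := by
  intro size
  rw [pv_A_eq]
  simp only [get_sample_text_pairs_alt]
  have hmax : (0 : Int) ≤ max size 0 := by omega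
  rw [PySem.List.slice_to _ hmax, PySem.List.slice_to _ hmax]
  have hL10 : pvBasePairs.length = 10 := rfl
  have hL3 : pvLabels.length = 3 := rfl
  have hfd10 : PySem.Int.floordiv (max size 0) (pvBasePairs.length : Int) = (max size 0) / 10 := by
    rw [hL10]; exact PySem.Int.floordiv_eq_ediv_of_pos (by omega)
  have hfd3 : PySem.Int.floordiv (max size 0) (pvLabels.length : Int) = (max size 0) / 3 := by
    rw [hL3]; exact PySem.Int.floordiv_eq_ediv_of_pos (by omega)
  rw [hfd10, hfd3]
  have h1 : (max size 0).toNat = size.toNat := by omega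
  have hb10 : (max size 0).toNat ≤ ((max size 0) / 10 + 1).toNat * pvBasePairs.length := by
    rw [hL10]; omega
  have hb3 : (max size 0).toNat ≤ ((max size 0) / 3 + 1).toNat * pvLabels.length := by
    rw [hL3]; omega
  rw [pv_flatten_replicate_take pvBasePairs ("", "") _ _ (by decide) hb10,
      pv_flatten_replicate_take pvLabels "" _ _ (by decide) hb3, h1]

-- ===== VERDICT (by name: the statement is the Claim_ definition above) =====
theorem get_sample_text_pairs_spec : Claim_equal_get_sample_text_pairs := by
  intro size _
  unfold Spec_get_sample_text_pairs
  exact pv_main size
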